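-- pv_equiv track=rewrite | github.com/wojmichaluk/WDI-2022-2023 | rozwiązania zestawów/zestaw 3/3.19.py | sp_pod
-- ===== SOURCE A (Python) =====
-- def sp_pod(T):
--     l=1
--     longest=0
--     suma_el=T[0]
--     suma_ind=0
--     last=T[0]
--     for i in range(1,N):
--         if T[i]>last:
--             l+=1
--             suma_el+=T[i]
--             suma_ind+=i
--             if suma_el==suma_ind:
--                 if l>longest:
--                     longest=l
--         else:
--             suma_el=T[i]
--             suma_ind=i
--             l=1
--         last=T[i]
--     if longest<2:
--         return 0
--     else:
--         return longest
--
-- N=5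
-- ===== SOURCE B (Python) =====
-- N = 5
--
-- def sp_pod(T):
--     # Pass 1: cut indices 0..N-1 into maximal strictly-increasing runs (start, end).
--     runs = []
--     start = 0
--     for i in range(1, N):
--         if T[i] <= T[i - 1]:
--             runs.append((start, i - 1))
--             start = i
--     runs.append((start, N - 1))
--     # Pass 2: within each run, c = sum of (T[j]-j); a prefix of length >= 2 with c == 0 qualifies.
--     best = 0
--     for (s, e) in runs:
--         c = 0
--         for j in range(s, e + 1):
--             c += T[j] - j
--             if j > s and c == 0 and j - s + 1 > best:
--                 best = j - s + 1
--     return best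
-- ===== Notes on version B (the rewrite author's own statement) =====
-- stated objective: alternative
-- what changed: A's single stateful scan (run length, element sum, index sum, last carried together and reset in place) is replaced by two passes: first cut indices 0..N-1 into maximal strictly-increasing runs, then scan each run with one running sum of T[j]-j and take the longest prefix of length >= 2 summing to zero.
import Mathlib
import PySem

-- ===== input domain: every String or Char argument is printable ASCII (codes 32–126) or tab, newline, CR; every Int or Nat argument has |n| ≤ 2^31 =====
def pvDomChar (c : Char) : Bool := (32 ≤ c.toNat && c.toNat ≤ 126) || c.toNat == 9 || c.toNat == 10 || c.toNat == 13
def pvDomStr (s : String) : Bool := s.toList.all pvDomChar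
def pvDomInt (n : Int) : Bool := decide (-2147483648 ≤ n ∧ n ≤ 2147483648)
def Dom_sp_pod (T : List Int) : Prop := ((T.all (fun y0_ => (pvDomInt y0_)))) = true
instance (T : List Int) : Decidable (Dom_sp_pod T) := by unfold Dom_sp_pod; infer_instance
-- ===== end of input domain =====

-- B replaces A's single stateful scan with two passes: cut indices 0..N-1 into maximal
-- strictly-increasing runs, then scan each run with a running sum of T[j]-j (objective:
-- alternative decomposition, same cost). Like A, B indexes T[0..4] via the global N = 5,
-- so both raise IndexError when len(T) < 5 (excluded by Pre_).


-- the module-level constant N = 5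
def pvN : Int := 5

-- ===== PORT A =====
-- state tuple: (l, longest, suma_el, suma_ind, last)
def sp_pod (T : List Int) : Int :=
  let s := (PySem.List.pyRange 1 pvN 1).foldl
    (fun (st : Int × Int × Int × Int × Int) i =>
      let ti := PySem.List.pyGetD T i 0
      if ti > st.2.2.2.2 then
        let l := st.1 + 1
        let se := st.2.2.1 + ti
        let si := st.2.2.2.1 + i
        let lg := if se = si then (if l > st.2.1 then l else st.2.1) else st.2.1
        (l, lg, se, si, ti)
      else (1, st.2.1, ti, i, ti))
    (1, 0, PySem.List.pyGetD T 0 0, 0, PySem.List.pyGetD T 0 0)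
  if s.2.1 < 2 then 0 else s.2.1

-- ===== PORT B =====
-- pass 1 state: (runs, start); pass 2 inner state: (best, c)
def sp_pod_alt (T : List Int) : Int :=
  let p := (PySem.List.pyRange 1 pvN 1).foldl
    (fun (st : List (Int × Int) × Int) i =>
      if PySem.List.pyGetD T i 0 ≤ PySem.List.pyGetD T (i - 1) 0 then
        (st.1 ++ [(st.2, i - 1)], i)
      else st)
    ([], 0)
  let runs := p.1 ++ [(p.2, pvN - 1)]
  runs.foldl
    (fun best se =>
      ((PySem.List.pyRange se.1 (se.2 + 1) 1).foldl
        (fun (q : Int × Int) j =>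
          let c := q.2 + (PySem.List.pyGetD T j 0 - j)
          (if j > se.1 ∧ c = 0 ∧ j - se.1 + 1 > q.1 then j - se.1 + 1 else q.1, c))
        (best, 0)).1)
    0

-- ===== PRECONDITION & SPEC =====
-- Pre_: the Python A indexes T[0], T[1..4] with the module-level N = 5, so it raises
-- IndexError exactly when len(T) < 5 (and so does B); those inputs are excluded.
def Pre_sp_pod (T : List Int) : Prop := 5 ≤ T.length
instance (T : List Int) : Decidable (Pre_sp_pod T) := by unfold Pre_sp_pod; infer_instance
def pvWitness_sp_pod : List Int := [1, 2, 3, 0, 4]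

def Spec_sp_pod (T : List Int) (out : Int) : Prop := out = sp_pod_alt T
instance (T : List Int) (out : Int) : Decidable (Spec_sp_pod T out) := by unfold Spec_sp_pod; infer_instance

-- ===== CLAIM (what is proved, stated in full; the proofs are below) =====
def Claim_equal_sp_pod : Prop := ∀ (T : List Int), Dom_sp_pod T → Pre_sp_pod T → Spec_sp_pod T (sp_pod T)

-- ===== LEMMAS AND PROOFS =====

-- collapse "(if P then x else y) < c" by the comparison of its two literal branches
lemma pv_ite_lt_true {P : Prop} [Decidable P] {x y c : Int} (hx : x < c) (hy : y < c) :
    ((if P then x else y) < c) ↔ True := by split_ifs <;> simp [hx, hy]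
lemma pv_ite_lt_false {P : Prop} [Decidable P] {x y c : Int} (hx : ¬ x < c) (hy : ¬ y < c) :
    ((if P then x else y) < c) ↔ False := by split_ifs <;> simp [hx, hy]
lemma pv_ite_lt_left {P : Prop} [Decidable P] {x y c : Int} (hx : x < c) (hy : ¬ y < c) :
    ((if P then x else y) < c) ↔ P := by split_ifs with h <;> simp [hx, hy, h]
lemma pv_ite_lt_right {P : Prop} [Decidable P] {x y c : Int} (hx : ¬ x < c) (hy : y < c) :
    ((if P then x else y) < c) ↔ ¬ P := by split_ifs with h <;> simp [hx, hy, h]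

set_option maxHeartbeats 4000000 in
lemma pv_main_case (a b c d e : Int) (r : List Int) :
    sp_pod (a::b::c::d::e::r) = sp_pod_alt (a::b::c::d::e::r) := by
  have g0 : PySem.List.pyGetD (a::b::c::d::e::r) (0:Int) 0 = a := by simp [pysem]
  have g1 : PySem.List.pyGetD (a::b::c::d::e::r) (1:Int) 0 = b := by simp [pysem]
  have g2 : PySem.List.pyGetD (a::b::c::d::e::r) (2:Int) 0 = c := by simp [pysem]
  have g3 : PySem.List.pyGetD (a::b::c::d::e::r) (3:Int) 0 = d := by simp [pysem]
  have g4 : PySem.List.pyGetD (a::b::c::d::e::r) (4:Int) 0 = e := by simp [pysem]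
  have r01 : PySem.List.pyRange 0 1 1 = [0] := by decide
  have r02 : PySem.List.pyRange 0 2 1 = [0,1] := by decide
  have r03 : PySem.List.pyRange 0 3 1 = [0,1,2] := by decide
  have r04 : PySem.List.pyRange 0 4 1 = [0,1,2,3] := by decide
  have r05 : PySem.List.pyRange 0 5 1 = [0,1,2,3,4] := by decide
  have r12 : PySem.List.pyRange 1 2 1 = [1] := by decide
  have r13 : PySem.List.pyRange 1 3 1 = [1,2] := by decide
  have r14 : PySem.List.pyRange 1 4 1 = [1,2,3] := by decide
  have r15 : PySem.List.pyRange 1 5 1 = [1,2,3,4] := by decide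
  have r23 : PySem.List.pyRange 2 3 1 = [2] := by decide
  have r24 : PySem.List.pyRange 2 4 1 = [2,3] := by decide
  have r25 : PySem.List.pyRange 2 5 1 = [2,3,4] := by decide
  have r34 : PySem.List.pyRange 3 4 1 = [3] := by decide
  have r35 : PySem.List.pyRange 3 5 1 = [3,4] := by decide
  have r45 : PySem.List.pyRange 4 5 1 = [4] := by decide
  by_cases h1 : a < b <;> by_cases h2 : b < c <;> by_cases h3 : c < d <;> by_cases h4 : d < e <;>
    (try simp only [sp_pod, sp_pod_alt, pvN,
      h1, h2, h3, h4, ← not_lt, ite_not, ite_true, ite_false,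
      List.cons_append, List.nil_append, List.foldl_cons, List.foldl_nil,
      Int.reduceAdd, Int.reduceSub, g0, g1, g2, g3, g4,
      r01, r02, r03, r04, r05, r12, r13, r14, r15, r23, r24, r25, r34, r35, r45,
      gt_iff_lt, Int.reduceLT, zero_add, sub_zero, true_and, and_true,
      false_and, and_false, or_false, false_or, true_or, or_true, not_not,
      if_true, if_false, lt_self_iff_false, not_false_iff]) <;>
    (try simp only [pv_ite_lt_true, pv_ite_lt_false, pv_ite_lt_left, pv_ite_lt_right,
      gt_iff_lt, Int.reduceLT, Int.reduceAdd, Int.reduceSub, zero_add, sub_zero,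
      ← add_sub_assoc, sub_add_eq_add_sub, sub_sub, sub_eq_zero,
      if_true, if_false, ite_true, ite_false, not_true, not_false_iff,
      true_and, and_true, false_and, and_false, or_false, false_or, true_or, or_true, not_not]) <;>
    (try split_ifs) <;> omega

-- ===== VERDICT (by name: the statement is the Claim_ definition above) =====
theorem sp_pod_spec : Claim_equal_sp_pod := by
  intro T _ hP
  unfold Spec_sp_pod
  match T, hP with
  | a::b::c::d::e::r, _ => exact pv_main_case a b c d e r
  | [], hP | [_], hP | [_,_], hP | [_,_,_], hP | [_,_,_,_], hP => simp [Pre_sp_pod] at hP
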